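-- pv_equiv track=rewrite | github.com/kareemsasa/operating-system-audit | core/diff.py | probe_failure_expected_state
-- ===== SOURCE A (Python) =====
-- PROBE_EXPECTED_EXIT_CODES = {
--     "config.fdesetup_status": {15, 1},  # permission denied, etc
--     "config.defaults_firewall_globalstate": {1},
--     "config.defaults_screen_lock_delay": {1},
--     "network.defaults_firewall_globalstate": {1},
--     "identity.dscl_list_users": {70, 1},  # internal software error, permission
--     "identity.dseditgroup_checkmember": {1},
-- }
--
-- def probe_expected_exit_codes(probe):
--     return PROBE_EXPECTED_EXIT_CODES.get(probe, set())
--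
-- def probe_failure_expected_state(probe, exit_codes):
--     """Returns 'expected' | 'mixed' | 'unexpected'. Mixed = some match, some don't (regression hiding in noise)."""
--     expected = probe_expected_exit_codes(probe)
--     if not expected:
--         return "unexpected"
--     codes = {int(c) for c in (exit_codes or {}).keys()}
--     if not codes:
--         return "unexpected"
--     if codes <= expected:
--         return "expected"
--     if codes & expected:
--         return "mixed"
--     return "unexpected"
-- ===== SOURCE B (Python) =====
-- PROBE_EXPECTED_EXIT_CODES = {
--     "config.fdesetup_status": {15, 1},  # permission denied, etc
--     "config.defaults_firewall_globalstate": {1},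
--     "config.defaults_screen_lock_delay": {1},
--     "network.defaults_firewall_globalstate": {1},
--     "identity.dscl_list_users": {70, 1},  # internal software error, permission
--     "identity.dseditgroup_checkmember": {1},
-- }
--
-- def probe_expected_exit_codes(probe):
--     return PROBE_EXPECTED_EXIT_CODES.get(probe, set())
--
-- def _join(v, w):
--     """Commutative, associative verdict join; 'mixed' is absorbing."""
--     return v if v == w else "mixed"
--
-- def probe_failure_expected_state(probe, exit_codes):
--     """Map each exit code to its own per-code verdict, then reduce the
--     verdicts with a join semilattice ('mixed' absorbing) instead of set
--     subset/intersection algebra."""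
--     expected = probe_expected_exit_codes(probe)
--     if not expected:
--         return "unexpected"
--     verdicts = ["expected" if int(c) in expected else "unexpected"
--                 for c in (exit_codes or {})]
--     if not verdicts:
--         return "unexpected"
--     out = verdicts[0]
--     for v in verdicts[1:]:
--         out = _join(out, v)
--     return out
-- ===== Notes on version B (the rewrite author's own statement) =====
-- stated objective: alternative
-- what changed: Instead of building a set of converted codes and testing `codes <= expected` and `codes & expected`, B maps every exit code to its own per-code verdict ('expected'/'unexpected') and reduces the verdict list with a commutative join operation in which 'mixed' is absorbing.
import Mathlib
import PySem

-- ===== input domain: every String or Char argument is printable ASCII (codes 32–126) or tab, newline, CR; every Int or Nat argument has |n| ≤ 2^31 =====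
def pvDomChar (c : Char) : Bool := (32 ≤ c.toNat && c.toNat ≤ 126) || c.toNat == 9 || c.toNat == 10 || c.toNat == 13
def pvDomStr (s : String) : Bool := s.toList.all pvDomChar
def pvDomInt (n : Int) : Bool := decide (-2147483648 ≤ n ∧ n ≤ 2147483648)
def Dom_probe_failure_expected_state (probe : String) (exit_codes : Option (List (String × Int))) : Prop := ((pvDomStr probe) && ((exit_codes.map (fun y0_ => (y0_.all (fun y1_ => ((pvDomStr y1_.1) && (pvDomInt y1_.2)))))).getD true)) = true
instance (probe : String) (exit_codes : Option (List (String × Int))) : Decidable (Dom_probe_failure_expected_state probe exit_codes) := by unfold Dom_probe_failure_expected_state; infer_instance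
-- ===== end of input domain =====

-- B replaces A's set algebra (subset/intersection tests on the set of codes) by mapping each
-- exit code to a per-code verdict and reducing with a join where "mixed" is absorbing.


-- ===== PORT A =====
def PROBE_EXPECTED_EXIT_CODES : PySem.Dict String (PySem.Set Int) :=
  PySem.Dict.ofList [
    ("config.fdesetup_status", PySem.Set.ofList [15, 1]),
    ("config.defaults_firewall_globalstate", PySem.Set.ofList [1]),
    ("config.defaults_screen_lock_delay", PySem.Set.ofList [1]),
    ("network.defaults_firewall_globalstate", PySem.Set.ofList [1]),
    ("identity.dscl_list_users", PySem.Set.ofList [70, 1]),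
    ("identity.dseditgroup_checkmember", PySem.Set.ofList [1])]

def probe_expected_exit_codes (probe : String) : PySem.Set Int :=
  PySem.Dict.getD PROBE_EXPECTED_EXIT_CODES probe PySem.Set.empty

def probe_failure_expected_state (probe : String) (exit_codes : Option (List (String × Int))) : String :=
  let expected := probe_expected_exit_codes probe
  if expected.isEmpty then "unexpected"
  else
    -- {int(c) for c in (exit_codes or {}).keys()} ; int(c) = PySem.Int.ofStr? (none = ValueError, excluded by Pre_)
    match (exit_codes.getD []).mapM (fun kv => PySem.Int.ofStr? kv.1) with
    | none => ""  -- Python raises ValueError here; outside Pre_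
    | some ints =>
      let codes : PySem.Set Int := PySem.Set.ofList ints
      if codes.isEmpty then "unexpected"
      else if PySem.Set.issubset codes expected then "expected"
      else if !(PySem.Set.inter codes expected).isEmpty then "mixed"
      else "unexpected"

-- ===== PORT B =====
def pvJoin (v w : String) : String := if v = w then v else "mixed"

def pvVerdict (expected : PySem.Set Int) (n : Int) : String :=
  if n ∈ expected then "expected" else "unexpected"

def probe_failure_expected_state_alt (probe : String) (exit_codes : Option (List (String × Int))) : String :=
  let expected := probe_expected_exit_codes probe
  if expected.isEmpty then "unexpected"
  else
    -- the comprehension converts every key with int(c); none = ValueError, outside Pre_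
    match (exit_codes.getD []).mapM (fun kv => PySem.Int.ofStr? kv.1) with
    | none => ""  -- Python raises ValueError here; outside Pre_
    | some ints =>
      match ints.map (pvVerdict expected) with
      | [] => "unexpected"
      | v :: rest => rest.foldl pvJoin v

-- ===== PRECONDITION & SPEC =====
-- Pre_ excludes exactly the inputs on which Python raises ValueError: a probe listed in the
-- table (so the conversion runs) together with an exit-code key that is not an int literal.
def Pre_probe_failure_expected_state (probe : String) (exit_codes : Option (List (String × Int))) : Prop :=
  probe ∈ ["config.fdesetup_status", "config.defaults_firewall_globalstate",
           "config.defaults_screen_lock_delay", "network.defaults_firewall_globalstate",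
           "identity.dscl_list_users", "identity.dseditgroup_checkmember"] →
    ∀ kv ∈ exit_codes.getD [], (PySem.Int.ofStr? kv.1).isSome
instance (probe : String) (exit_codes : Option (List (String × Int))) : Decidable (Pre_probe_failure_expected_state probe exit_codes) := by unfold Pre_probe_failure_expected_state; infer_instance

def pvWitness_probe_failure_expected_state : String × (Option (List (String × Int))) :=
  ("config.fdesetup_status", some [("15", 2)])

def Spec_probe_failure_expected_state (probe : String) (exit_codes : Option (List (String × Int))) (out : String) : Prop := out = probe_failure_expected_state_alt probe exit_codes
instance (probe : String) (exit_codes : Option (List (String × Int))) (out : String) : Decidable (Spec_probe_failure_expected_state probe exit_codes out) := by unfold Spec_probe_failure_expected_state; infer_instance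

-- ===== CLAIM (what is proved, stated in full; the proofs are below) =====
def Claim_equal_probe_failure_expected_state : Prop := ∀ (probe : String) (exit_codes : Option (List (String × Int))), Dom_probe_failure_expected_state probe exit_codes → Pre_probe_failure_expected_state probe exit_codes → Spec_probe_failure_expected_state probe exit_codes (probe_failure_expected_state probe exit_codes)

-- ===== LEMMAS AND PROOFS =====

theorem ofList_eq_nil_iff (ints : List Int) :
    (PySem.Set.ofList ints : PySem.Set Int) = [] ↔ ints = [] := by
  constructor
  · intro h
    cases ints with
    | nil => rfl
    | cons a t =>
      have : a ∈ (PySem.Set.ofList (a :: t) : PySem.Set Int) := by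
        rw [PySem.Set.mem_ofList]; exact List.mem_cons_self ..
      rw [h] at this; cases this
  · intro h; subst h; rfl

-- The four-flag case analysis: A's set-algebra verdict through any/all flags over the codes.
theorem verdict_eq (expected : PySem.Set Int) (ints : List Int) :
    (let codes : PySem.Set Int := PySem.Set.ofList ints
     if codes.isEmpty then "unexpected"
     else if PySem.Set.issubset codes expected then "expected"
     else if !(PySem.Set.inter codes expected).isEmpty then "mixed"
     else "unexpected")
    = (if !(ints.any (fun n => decide (n ∈ expected))) then "unexpected"
       else if ints.any (fun n => !decide (n ∈ expected)) then "mixed"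
       else "expected") := by
  cases hm : ints.any (fun n => decide (n ∈ expected)) with
  | false =>
    have hnomem : ∀ n ∈ ints, n ∉ expected := by
      intro n hn
      have := List.any_eq_false.mp hm n hn
      simpa using this
    cases ints with
    | nil => simp
    | cons a t =>
      have hne : (PySem.Set.ofList (a :: t) : PySem.Set Int) ≠ [] := by
        intro h; exact (by cases (ofList_eq_nil_iff (a :: t)).mp h)
      have hsub : PySem.Set.issubset (PySem.Set.ofList (a :: t)) expected = false := by
        rw [Bool.eq_false_iff]
        intro h
        have ha := (PySem.Set.issubset_iff _ _).mp h a
          (by rw [PySem.Set.mem_ofList]; exact List.mem_cons_self ..)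
        exact hnomem a (List.mem_cons_self ..) ha
      have hinter : (PySem.Set.inter (PySem.Set.ofList (a :: t)) expected : PySem.Set Int) = [] := by
        rw [List.eq_nil_iff_forall_not_mem]
        intro x hx
        have hx' := (PySem.Set.mem_inter ..).mp hx
        exact hnomem x ((PySem.Set.mem_ofList ..).mp hx'.1) hx'.2
      simp [List.isEmpty_iff, hne, hsub, hinter]
  | true =>
    obtain ⟨x, hxmem, hxc⟩ := List.any_eq_true.mp hm
    have hxmem' : x ∈ expected := by simpa using hxc
    have hne : (PySem.Set.ofList ints : PySem.Set Int) ≠ [] := by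
      intro h
      rw [ofList_eq_nil_iff] at h; subst h; cases hxmem
    cases hmm : ints.any (fun n => !decide (n ∈ expected)) with
    | false =>
      have hall : ∀ n ∈ ints, n ∈ expected := by
        intro n hn
        have := List.any_eq_false.mp hmm n hn
        simpa using this
      have hsub : PySem.Set.issubset (PySem.Set.ofList ints) expected = true := by
        rw [PySem.Set.issubset_iff]
        intro y hy
        exact hall y ((PySem.Set.mem_ofList ..).mp hy)
      simp [List.isEmpty_iff, hne, hsub]
    | true =>
      obtain ⟨z, hzmem, hzc⟩ := List.any_eq_true.mp hmm
      have hzc' : z ∉ expected := by simpa using hzc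
      have hsub : PySem.Set.issubset (PySem.Set.ofList ints) expected = false := by
        rw [Bool.eq_false_iff]
        intro h
        exact hzc' ((PySem.Set.issubset_iff _ _).mp h z (by rw [PySem.Set.mem_ofList]; exact hzmem))
      have hinter : (PySem.Set.inter (PySem.Set.ofList ints) expected : PySem.Set Int) ≠ [] := by
        intro h
        have hx : x ∈ (PySem.Set.inter (PySem.Set.ofList ints) expected : PySem.Set Int) := by
          rw [PySem.Set.mem_inter]
          exact ⟨(PySem.Set.mem_ofList ..).mpr hxmem, hxmem'⟩
        rw [h] at hx; cases hx
      simp [List.isEmpty_iff, hne, hsub, hinter]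

-- Invariant of B's join fold: folding over mapped verdicts keeps the accumulator iff all
-- verdicts agree with it, and collapses to "mixed" otherwise.
theorem foldl_join_inv (expected : PySem.Set Int) :
    ∀ (ints : List Int) (a : String),
      (ints.map (pvVerdict expected)).foldl pvJoin a =
        if ints.all (fun n => pvVerdict expected n = a) then a else "mixed" := by
  intro ints
  induction ints with
  | nil => intro a; simp
  | cons n rest ih =>
    intro a
    rw [List.map_cons, List.foldl_cons, ih]
    by_cases hv : pvVerdict expected n = a
    · rw [hv]
      have : pvJoin a a = a := by simp [pvJoin]
      rw [this]
      simp [hv]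
    · have hja : pvJoin a (pvVerdict expected n) = "mixed" := by
        have hne : a ≠ pvVerdict expected n := fun h => hv h.symm
        simp [pvJoin, hne]
      rw [hja]
      have hAllFalse : ((n :: rest).all (fun m => decide (pvVerdict expected m = a))) = false := by
        simp [hv]
      simp only [hAllFalse]
      by_cases hr : rest.all (fun m => pvVerdict expected m = "mixed")
      · simp [hr]
      · simp [hr]

-- B's verdict-join result through the same any/all flags.
theorem join_eq (expected : PySem.Set Int) (ints : List Int) :
    (match ints.map (pvVerdict expected) with
     | [] => "unexpected"
     | v :: rest => rest.foldl pvJoin v)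
    = (if !(ints.any (fun n => decide (n ∈ expected))) then "unexpected"
       else if ints.any (fun n => !decide (n ∈ expected)) then "mixed"
       else "expected") := by
  cases ints with
  | nil => simp
  | cons n rest =>
    rw [List.map_cons]
    show (rest.map (pvVerdict expected)).foldl pvJoin (pvVerdict expected n) = _
    rw [foldl_join_inv]
    by_cases hn : n ∈ expected
    · have hv : pvVerdict expected n = "expected" := by simp [pvVerdict, hn]
      rw [hv]
      by_cases hall : ∀ m ∈ rest, m ∈ expected
      · have h1 : rest.all (fun m => pvVerdict expected m = "expected") := by
          rw [List.all_eq_true]; intro m hm; simp [pvVerdict, hall m hm]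
        have h2 : (n :: rest).any (fun m => decide (m ∈ expected)) = true := by
          simp [hn]
        have h3 : (n :: rest).any (fun m => !decide (m ∈ expected)) = false := by
          simp; exact ⟨hn, hall⟩
        simp [h1, h2, h3]
      · obtain ⟨z, hz, hzn⟩ := by
          simpa using hall
        have h1 : rest.all (fun m => pvVerdict expected m = "expected") = false := by
          rw [Bool.eq_false_iff]; intro h
          have := List.all_eq_true.mp h z hz
          simp [pvVerdict, hzn] at this
        have h2 : (n :: rest).any (fun m => decide (m ∈ expected)) = true := by
          simp [hn]
        have h3 : (n :: rest).any (fun m => !decide (m ∈ expected)) = true := by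
          rw [List.any_eq_true]
          exact ⟨z, List.mem_cons_of_mem _ hz, by simp [hzn]⟩
        simp [h1, h2, h3]
    · have hv : pvVerdict expected n = "unexpected" := by simp [pvVerdict, hn]
      rw [hv]
      by_cases hall : ∀ m ∈ rest, m ∉ expected
      · have h1 : rest.all (fun m => pvVerdict expected m = "unexpected") := by
          rw [List.all_eq_true]; intro m hm; simp [pvVerdict, hall m hm]
        have h2 : (n :: rest).any (fun m => decide (m ∈ expected)) = false := by
          simp; exact ⟨hn, hall⟩
        simp [h1, h2]
      · obtain ⟨z, hz, hzn⟩ := by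
          simpa using hall
        have h1 : rest.all (fun m => pvVerdict expected m = "unexpected") = false := by
          rw [Bool.eq_false_iff]; intro h
          have := List.all_eq_true.mp h z hz
          simp [pvVerdict, hzn] at this
        have h2 : (n :: rest).any (fun m => decide (m ∈ expected)) = true := by
          rw [List.any_eq_true]
          exact ⟨z, List.mem_cons_of_mem _ hz, by simp [hzn]⟩
        have h3 : (n :: rest).any (fun m => !decide (m ∈ expected)) = true := by
          simp [hn]
        simp [h1, h2, h3]

-- ===== VERDICT (by name: the statement is the Claim_ definition above) =====
theorem probe_failure_expected_state_spec : Claim_equal_probe_failure_expected_state := by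
  intro probe exit_codes _hDom _hPre
  unfold Spec_probe_failure_expected_state
  unfold probe_failure_expected_state probe_failure_expected_state_alt
  cases hemp : (probe_expected_exit_codes probe).isEmpty with
  | true =>
    rw [List.isEmpty_iff] at hemp
    simp [hemp]
  | false =>
    cases hmapM : (exit_codes.getD []).mapM (fun kv => PySem.Int.ofStr? kv.1) with
    | none => simp
    | some ints =>
      simp only [hemp, Bool.false_eq_true, if_false]
      rw [verdict_eq, join_eq]
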